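-- pv_equiv track=rewrite | github.com/Nirajan2005/CRISPR-cas9-simulation | CRISPR_cas9_simulation_V2.py | find_pam_sites
-- ===== SOURCE A (Python) =====
-- def find_pam_sites(dna, pam="NGG"):
--     pam_sites = []
--     for i in range(len(dna) - len(pam) + 1):
--         match = True
--         for j, base in enumerate(pam):
--             if base != "N" and dna[i + j] != base:
--                 match = False
--                 break
--         if match:
--             pam_sites.append(i)
--     return pam_sites
-- ===== SOURCE B (Python) =====
-- def find_pam_sites(dna, pam="NGG"):
--     # Column-wise sieve: start with every window start, then for each non-'N'
--     # pam column keep only the starts whose dna character matches that column.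
--     candidates = list(range(len(dna) - len(pam) + 1))
--     for j, base in enumerate(pam):
--         if base != "N":
--             candidates = [i for i in candidates if dna[i + j] == base]
--     return candidates
-- ===== Notes on version B (the rewrite author's own statement) =====
-- stated objective: alternative
-- what changed: B inverts the loop nesting: instead of scanning each window position with an inner per-character check, match flag and break, it sieves one pam column at a time, filtering the surviving candidate start positions against each non-wildcard column.
import Mathlib
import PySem

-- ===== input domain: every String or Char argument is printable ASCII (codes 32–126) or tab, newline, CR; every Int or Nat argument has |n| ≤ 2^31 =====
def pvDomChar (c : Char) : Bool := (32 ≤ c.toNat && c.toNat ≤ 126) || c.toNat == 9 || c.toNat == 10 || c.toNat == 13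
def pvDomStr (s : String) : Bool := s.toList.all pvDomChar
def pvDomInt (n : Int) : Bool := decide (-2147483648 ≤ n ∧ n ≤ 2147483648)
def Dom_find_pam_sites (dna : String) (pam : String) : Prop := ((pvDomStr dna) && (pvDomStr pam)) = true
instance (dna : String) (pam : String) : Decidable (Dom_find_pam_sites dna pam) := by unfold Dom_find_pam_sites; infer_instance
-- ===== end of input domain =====

-- B sieves candidate positions column by column instead of A's per-position inner scan; same result, same cost class.

-- ===== PORT A =====
-- inner loop of A: for j, base in enumerate(pam): if base != "N" and dna[i+j] != base: match=False; break
-- (dna[i+j] is always in range for the i produced by A's outer range, so pyGet? never returns none there;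
--  the none branch below compares unequal, matching nothing reachable)
def pvAMatch (dna : String) : List (Int × Char) → Int → Bool
  | [], _ => true
  | (j, base) :: rest, i =>
    if base ≠ 'N' ∧ PySem.Str.pyGet? dna (i + j) ≠ some base then false
    else pvAMatch dna rest i

def find_pam_sites (dna : String) (pam : String) : List Int :=
  (PySem.List.pyRange 0 (PySem.Str.len dna - PySem.Str.len pam + 1) 1).foldl
    (fun acc i => if pvAMatch dna (PySem.List.enumerate pam.toList 0) i then acc ++ [i] else acc) []

-- ===== PORT B =====
def find_pam_sites_alt (dna : String) (pam : String) : List Int :=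
  (PySem.List.enumerate pam.toList 0).foldl
    (fun cands jb =>
      if jb.2 ≠ 'N' then cands.filter (fun i => PySem.Str.pyGet? dna (i + jb.1) == some jb.2)
      else cands)
    (PySem.List.pyRange 0 (PySem.Str.len dna - PySem.Str.len pam + 1) 1)

-- ===== PRECONDITION & SPEC =====
def Spec_find_pam_sites (dna : String) (pam : String) (out : List Int) : Prop := out = find_pam_sites_alt dna pam
instance (dna : String) (pam : String) (out : List Int) : Decidable (Spec_find_pam_sites dna pam out) := by unfold Spec_find_pam_sites; infer_instance

-- ===== CLAIM (what is proved, stated in full; the proofs are below) =====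
def Claim_equal_find_pam_sites : Prop := ∀ (dna : String) (pam : String), Dom_find_pam_sites dna pam → Spec_find_pam_sites dna pam (find_pam_sites dna pam)

-- ===== LEMMAS AND PROOFS =====

-- B's column-wise sieve over any pam-column list equals filtering by A's inner check.
lemma pvSieve_eq_filter (dna : String) (ps : List (Int × Char)) (cands : List Int) :
    ps.foldl
      (fun cands jb =>
        if jb.2 ≠ 'N' then cands.filter (fun i => PySem.Str.pyGet? dna (i + jb.1) == some jb.2)
        else cands) cands
    = cands.filter (fun i => pvAMatch dna ps i) := by
  induction ps generalizing cands with
  | nil => simp [pvAMatch]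
  | cons jb rest ih =>
    obtain ⟨j, b⟩ := jb
    by_cases hb : b = 'N'
    · subst hb
      simp only [List.foldl_cons]
      rw [if_neg (by simp), ih]
      apply List.filter_congr
      intro i _
      simp [pvAMatch]
    · simp only [List.foldl_cons, if_pos (by simpa using hb)]
      rw [ih, List.filter_filter]
      apply List.filter_congr
      intro i _
      by_cases hg : PySem.List.pyGet? dna.toList (i + j) = some b
      · simp [pvAMatch, hg, hb, PySem.Str.pyGet?]
      · simp [pvAMatch, hg, hb, PySem.Str.pyGet?]

-- ===== VERDICT (by name: the statement is the Claim_ definition above) =====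
theorem find_pam_sites_spec : Claim_equal_find_pam_sites := by
  intro dna pam _
  unfold Spec_find_pam_sites find_pam_sites find_pam_sites_alt
  rw [PySem.List.foldl_append_if_eq_filter, pvSieve_eq_filter]
  simp
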